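-- pv_equiv track=rewrite | github.com/blurbdust/litex_bcrypt | sim_axis8_packets.py | add_checksums_around_payload
-- ===== SOURCE A (Python) =====
-- def add_checksums_around_payload(header_bytes, payload_bytes):
--     # 32-bit little-endian sum of 32-bit little-endian words (pad with zeros)
--     def csum(bs):
--         s = 0
--         for i in range(0, len(bs), 4):
--             w = bs[i:i+4] + [0]*(4 - (len(bs[i:i+4])%4))
--             s = (s + (w[0] | (w[1]<<8) | (w[2]<<16) | (w[3]<<24))) & 0xFFFFFFFF
--         s ^= 0xFFFFFFFF
--         return [s & 0xFF, (s>>8)&0xFF, (s>>16)&0xFF, (s>>24)&0xFF]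
--
--     return header_bytes + csum(header_bytes) + payload_bytes + csum(payload_bytes)
-- ===== SOURCE B (Python) =====
-- def add_checksums_around_payload(header_bytes, payload_bytes):
--     # one pass per byte: OR each byte into its little-endian position, flush every 4th
--     def csum(bs):
--         s = 0
--         w = 0
--         for i, b in enumerate(bs):
--             w |= b << (8 * (i % 4))
--             if i % 4 == 3:
--                 s = (s + w) & 0xFFFFFFFF
--                 w = 0
--         s = (s + w) & 0xFFFFFFFF
--         s ^= 0xFFFFFFFF
--         return [(s >> (8 * k)) & 0xFF for k in range(4)]
--
--     return header_bytes + csum(header_bytes) + payload_bytes + csum(payload_bytes)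
-- ===== Notes on version B (the rewrite author's own statement) =====
-- stated objective: alternative
-- what changed: csum is rewritten as a single per-byte pass that ORs each byte into its position within an accumulated word and flushes the word sum every 4th byte, replacing A's stride-4 loop that slices and zero-pads 4-byte chunks; the output bytes come from a comprehension over shift amounts instead of four spelled-out expressions.
import Mathlib
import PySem

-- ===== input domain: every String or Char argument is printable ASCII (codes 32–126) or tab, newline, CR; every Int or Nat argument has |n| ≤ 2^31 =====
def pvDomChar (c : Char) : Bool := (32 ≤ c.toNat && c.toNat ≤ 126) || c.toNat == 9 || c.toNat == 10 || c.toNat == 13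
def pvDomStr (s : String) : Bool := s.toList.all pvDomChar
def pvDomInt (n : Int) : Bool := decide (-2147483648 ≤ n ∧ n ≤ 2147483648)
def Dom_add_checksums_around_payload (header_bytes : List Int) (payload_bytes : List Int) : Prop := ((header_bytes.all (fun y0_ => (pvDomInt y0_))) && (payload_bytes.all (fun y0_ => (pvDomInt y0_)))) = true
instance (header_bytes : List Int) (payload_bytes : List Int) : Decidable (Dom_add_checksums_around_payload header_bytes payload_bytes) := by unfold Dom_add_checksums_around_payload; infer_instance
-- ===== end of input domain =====

-- B rewrites csum as one per-byte pass (OR into position, flush every 4th byte) instead of A's stride-4 chunk/pad loop; same cost, different decomposition.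

-- ===== PORT A =====
-- loop body of A's csum: one iteration of `for i in range(0, len(bs), 4)`
def pvStepA (bs : List Int) (s : Int) (i : Int) : Int :=
  let chunk := PySem.List.slice bs (some i) (some (i + 4))
  let w := chunk ++ List.replicate (4 - chunk.length % 4) (0 : Int)
  PySem.Int.band
    (s + (PySem.Int.bor (PySem.Int.bor (PySem.Int.bor (PySem.List.pyGetD w 0 0)
        ((PySem.List.pyGetD w 1 0) <<< (8:Nat))) ((PySem.List.pyGetD w 2 0) <<< (16:Nat)))
        ((PySem.List.pyGetD w 3 0) <<< (24:Nat))))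
    4294967295

-- A's inner csum
def pvCsumA (bs : List Int) : List Int :=
  let s := (PySem.List.pyRange 0 (PySem.List.len bs) 4).foldl (pvStepA bs) 0
  let s := PySem.Int.bxor s 4294967295
  [PySem.Int.band s 255, PySem.Int.band (s >>> (8:Nat)) 255,
   PySem.Int.band (s >>> (16:Nat)) 255, PySem.Int.band (s >>> (24:Nat)) 255]

def add_checksums_around_payload (header_bytes : List Int) (payload_bytes : List Int) : List Int :=
  header_bytes ++ pvCsumA header_bytes ++ payload_bytes ++ pvCsumA payload_bytes

-- ===== PORT B =====
-- loop body of B's csum: one iteration of `for i, b in enumerate(bs)` over state (s, w)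
def pvStepB (p : Int × Int) (ib : Int × Int) : Int × Int :=
  let w := PySem.Int.bor p.2 (ib.2 <<< (8 * (PySem.Int.mod ib.1 4)).toNat)
  if PySem.Int.mod ib.1 4 = 3 then (PySem.Int.band (p.1 + w) 4294967295, 0) else (p.1, w)

-- B's inner csum
def pvCsumB (bs : List Int) : List Int :=
  let p := (PySem.List.enumerate bs).foldl pvStepB (0, 0)
  let s := PySem.Int.band (p.1 + p.2) 4294967295
  let s := PySem.Int.bxor s 4294967295
  (PySem.List.pyRange 0 4 1).map (fun k => PySem.Int.band (s >>> (8 * k).toNat) 255)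

def add_checksums_around_payload_alt (header_bytes : List Int) (payload_bytes : List Int) : List Int :=
  header_bytes ++ pvCsumB header_bytes ++ payload_bytes ++ pvCsumB payload_bytes

-- ===== PRECONDITION & SPEC =====
def Spec_add_checksums_around_payload (header_bytes : List Int) (payload_bytes : List Int) (out : List Int) : Prop := out = add_checksums_around_payload_alt header_bytes payload_bytes
instance (header_bytes : List Int) (payload_bytes : List Int) (out : List Int) : Decidable (Spec_add_checksums_around_payload header_bytes payload_bytes out) := by unfold Spec_add_checksums_around_payload; infer_instance

-- ===== CLAIM (what is proved, stated in full; the proofs are below) =====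
def Claim_equal_add_checksums_around_payload : Prop := ∀ (header_bytes : List Int) (payload_bytes : List Int), Dom_add_checksums_around_payload header_bytes payload_bytes → Spec_add_checksums_around_payload header_bytes payload_bytes (add_checksums_around_payload header_bytes payload_bytes)

-- ===== LEMMAS AND PROOFS =====

-- 32-bit little-endian word of four bytes, associated exactly as both ports build it
def pvWordOf (a b c d : Int) : Int :=
  PySem.Int.bor (PySem.Int.bor (PySem.Int.bor a (b <<< (8:Nat))) (c <<< (16:Nat))) (d <<< (24:Nat))

-- common chunk-level specification of the running masked sum
def pvChunkSum : List Int → Int → Int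
  | [], s => s
  | [a], s => PySem.Int.band (s + pvWordOf a 0 0 0) 4294967295
  | [a, b], s => PySem.Int.band (s + pvWordOf a b 0 0) 4294967295
  | [a, b, c], s => PySem.Int.band (s + pvWordOf a b c 0) 4294967295
  | a :: b :: c :: d :: t, s => pvChunkSum t (PySem.Int.band (s + pvWordOf a b c d) 4294967295)

-- chunk-level specification of B's loop state (sum so far, pending partial word)
def pvChunkState : List Int → Int → Int × Int
  | [], s => (s, 0)
  | [a], s => (s, pvWordOf a 0 0 0)
  | [a, b], s => (s, pvWordOf a b 0 0)
  | [a, b, c], s => (s, pvWordOf a b c 0)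
  | a :: b :: c :: d :: t, s => pvChunkState t (PySem.Int.band (s + pvWordOf a b c d) 4294967295)

lemma pvBand_mask_bounds (x : Int) :
    0 ≤ PySem.Int.band x 4294967295 ∧ PySem.Int.band x 4294967295 ≤ 4294967295 := by
  unfold PySem.Int.band
  by_cases h : 0 ≤ x
  · rw [if_pos h, if_pos (by norm_num : (0:Int) ≤ 4294967295)]
    have := Nat.and_le_right (n := x.toNat) (m := (4294967295 : Int).toNat)
    have ht : (4294967295 : Int).toNat = 4294967295 := rfl
    constructor <;> omega
  · rw [if_neg h, if_pos (by norm_num : (0:Int) ≤ 4294967295)]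
    have := Nat.sub_le ((4294967295 : Int).toNat) (((4294967295 : Int).toNat &&& (-x - 1).toNat))
    have ht : (4294967295 : Int).toNat = 4294967295 := rfl
    constructor <;> omega

lemma pvBand_of_bounds (y : Int) (h0 : 0 ≤ y) (hM : y ≤ 4294967295) :
    PySem.Int.band y 4294967295 = y := by
  unfold PySem.Int.band
  rw [if_pos h0, if_pos (by norm_num : (0:Int) ≤ 4294967295)]
  have h1 : (4294967295 : Int).toNat = 2 ^ 32 - 1 := rfl
  rw [h1, Nat.and_two_pow_sub_one_eq_mod, Nat.mod_eq_of_lt (by omega)]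
  omega

lemma pvRange4_cons (n : Int) (h : 0 < n) :
    PySem.List.pyRange 0 n 4 = 0 :: (PySem.List.pyRange 0 (n - 4) 4).map (· + 4) := by
  rw [PySem.List.pyRange_of_pos 0 n (by norm_num), PySem.List.pyRange_of_pos 0 (n - 4) (by norm_num)]
  have hc : ((n - 0 + 4 - 1) / 4).toNat =
      (if 0 < n - 4 then ((n - 4 - 0 + 4 - 1) / 4).toNat else 0) + 1 := by
    split_ifs with h4
    · omega
    · have : (n + 3) / 4 = 1 := by omega
      omega
  rw [if_pos h, hc, List.range_succ_eq_map]
  simp only [List.map_cons, List.map_map, Nat.cast_zero, mul_zero, add_zero]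
  congr 1

lemma pvStepA_shift (a b c d : Int) (t : List Int) (x : Int) (hx : 0 ≤ x) (acc : Int) :
    pvStepA (a :: b :: c :: d :: t) acc (x + 4) = pvStepA t acc x := by
  have hs : PySem.List.slice (a :: b :: c :: d :: t) (some (x + 4)) (some (x + 4 + 4)) =
      PySem.List.slice t (some x) (some (x + 4)) := by
    rw [PySem.List.slice_toNat _ (by omega) (by omega),
        PySem.List.slice_toNat _ hx (by omega)]
    have h1 : (x + 4).toNat = x.toNat + 4 := by omega
    have h2 : (x + 4 + 4).toNat = (x.toNat + 4) + 4 := by omega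
    rw [h1, h2]
    rw [show (x.toNat + 4) + 4 - (x.toNat + 4) = 4 from by omega,
        show x.toNat + 4 - x.toNat = 4 from by omega]
    have h5 : List.drop (x.toNat + 4) (a :: b :: c :: d :: t) = List.drop x.toNat t := by
      rw [show x.toNat + 4 = 4 + x.toNat from by omega, ← List.drop_drop]
      rfl
    rw [h5]
  unfold pvStepA
  rw [hs]

lemma pvLemA (bs : List Int) (s : Int) :
    (PySem.List.pyRange 0 (PySem.List.len bs) 4).foldl (pvStepA bs) s = pvChunkSum bs s := by
  induction bs, s using pvChunkSum.induct with
  | case1 s => simp [PySem.List.len_eq, pvChunkSum, show PySem.List.pyRange 0 0 4 = [] from by decide]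
  | case2 s a =>
    simp only [PySem.List.len_eq, List.length_cons, List.length_nil]
    rw [show ((((0:Nat)+1 : Nat)) : Int) = 1 from by norm_num,
        show PySem.List.pyRange 0 1 4 = [0] from by decide]
    simp [pvStepA, pvChunkSum, pvWordOf, PySem.List.slice, PySem.List.clampIdx,
          PySem.List.pyGetD, List.replicate]
  | case3 s a b =>
    simp only [PySem.List.len_eq, List.length_cons, List.length_nil]
    rw [show ((((0:Nat)+1+1 : Nat)) : Int) = 2 from by norm_num,
        show PySem.List.pyRange 0 2 4 = [0] from by decide]
    simp [pvStepA, pvChunkSum, pvWordOf, PySem.List.slice, PySem.List.clampIdx,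
          PySem.List.pyGetD, List.replicate]
  | case4 s a b c =>
    simp only [PySem.List.len_eq, List.length_cons, List.length_nil]
    rw [show ((((0:Nat)+1+1+1 : Nat)) : Int) = 3 from by norm_num,
        show PySem.List.pyRange 0 3 4 = [0] from by decide]
    simp [pvStepA, pvChunkSum, pvWordOf, PySem.List.slice, PySem.List.clampIdx,
          PySem.List.pyGetD]
  | case5 a b c d t s ih =>
    have hn : PySem.List.len (a :: b :: c :: d :: t) = (t.length : Int) + 4 := by
      simp [PySem.List.len_eq]; ring
    rw [hn, pvRange4_cons _ (by positivity), List.foldl_cons, List.foldl_map]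
    have h0 : pvStepA (a :: b :: c :: d :: t) s 0 =
        PySem.Int.band (s + pvWordOf a b c d) 4294967295 := by
      simp [pvStepA, pvWordOf, PySem.List.slice, PySem.List.clampIdx,
            PySem.List.pyGetD, List.replicate]
    rw [h0]
    have hcg : ∀ (acc : Int), ∀ x ∈ PySem.List.pyRange 0 ((t.length : Int) + 4 - 4) 4,
        pvStepA (a :: b :: c :: d :: t) acc (x + 4) = pvStepA t acc x := by
      intro acc x hx
      have h0x : 0 ≤ x := by
        rcases (PySem.List.mem_pyRange_iff_of_pos (by norm_num) x).mp hx with ⟨h1, _, _⟩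
        exact h1
      exact pvStepA_shift a b c d t x h0x acc
    rw [PySem.List.foldl_congr_mem _ _ _ _ hcg]
    have ht : ((t.length : Int) + 4 - 4) = PySem.List.len t := by
      simp [PySem.List.len_eq]
    rw [ht, ih]
    rfl

lemma pvBorZeroLeft (a : Int) : PySem.Int.bor 0 a = a := by
  rw [PySem.Int.bor_comm, PySem.Int.bor_zero]

lemma pvLemB (bs : List Int) (s : Int) (m : Nat) :
    (PySem.List.enumerate bs (4 * (m : Int))).foldl pvStepB (s, 0) = pvChunkState bs s := by
  induction bs, s using pvChunkState.induct generalizing m with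
  | case1 s => simp [PySem.List.enumerate_nil, pvChunkState]
  | case2 s a =>
    simp only [PySem.List.enumerate_cons, PySem.List.enumerate_nil, List.foldl_cons, List.foldl_nil]
    simp [pvStepB, pvChunkState, pvWordOf, pvBorZeroLeft,
          show (4 * (m : Int)) % 4 = 0 from by omega]
  | case3 s a b =>
    simp only [PySem.List.enumerate_cons, PySem.List.enumerate_nil, List.foldl_cons, List.foldl_nil]
    simp [pvStepB, pvChunkState, pvWordOf, pvBorZeroLeft,
          show (4 * (m : Int)) % 4 = 0 from by omega,
          show (4 * (m : Int) + 1) % 4 = 1 from by omega]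
  | case4 s a b c =>
    simp only [PySem.List.enumerate_cons, PySem.List.enumerate_nil, List.foldl_cons, List.foldl_nil]
    simp [pvStepB, pvChunkState, pvWordOf, pvBorZeroLeft,
          show (4 * (m : Int)) % 4 = 0 from by omega,
          show (4 * (m : Int) + 1) % 4 = 1 from by omega,
          show (4 * (m : Int) + 1 + 1) % 4 = 2 from by omega]
  | case5 a b c d t s ih =>
    simp only [PySem.List.enumerate_cons, List.foldl_cons]
    have e1 : (4 * (m : Int)) % 4 = 0 := by omega
    have e2 : (4 * (m : Int) + 1) % 4 = 1 := by omega
    have e3 : (4 * (m : Int) + 1 + 1) % 4 = 2 := by omega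
    have e4 : (4 * (m : Int) + 1 + 1 + 1) % 4 = 3 := by omega
    have hstep : pvStepB (pvStepB (pvStepB (pvStepB (s, 0) (4 * (m : Int), a))
        (4 * (m : Int) + 1, b)) (4 * (m : Int) + 1 + 1, c)) (4 * (m : Int) + 1 + 1 + 1, d) =
        (PySem.Int.band (s + pvWordOf a b c d) 4294967295, 0) := by
      simp [pvStepB, e1, e2, e3, e4, pvWordOf, pvBorZeroLeft]
    rw [hstep]
    have hen : (4 * (m : Int) + 1 + 1 + 1 + 1) = 4 * ((m + 1 : Nat) : Int) := by push_cast; ring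
    rw [hen, ih (m + 1)]
    rfl

lemma pvStateSum (bs : List Int) (s : Int) (h0 : 0 ≤ s) (hM : s ≤ 4294967295) :
    PySem.Int.band ((pvChunkState bs s).1 + (pvChunkState bs s).2) 4294967295 = pvChunkSum bs s := by
  induction bs, s using pvChunkState.induct with
  | case1 s => simpa [pvChunkState, pvChunkSum] using pvBand_of_bounds s h0 hM
  | case2 s a => rfl
  | case3 s a b => rfl
  | case4 s a b c => rfl
  | case5 a b c d t s ih =>
    have hb := pvBand_mask_bounds (s + pvWordOf a b c d)
    exact ih hb.1 hb.2

lemma pvCsum_eq (bs : List Int) : pvCsumA bs = pvCsumB bs := by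
  have hA := pvLemA bs 0
  have hB := pvLemB bs 0 0
  rw [show (4 * ((0 : Nat) : Int)) = 0 from by norm_num] at hB
  simp only [pvCsumA, pvCsumB, hA, hB]
  rw [pvStateSum bs 0 (by norm_num) (by norm_num)]
  rw [show PySem.List.pyRange 0 4 1 = [0, 1, 2, 3] from by decide]
  simp only [List.map_cons, List.map_nil, Int.shiftRight_natCast_right,
    show ((8:Int) * 0).toNat = 0 from rfl, show ((8:Int) * 1).toNat = 8 from rfl,
    show ((8:Int) * 2).toNat = 16 from rfl, show ((8:Int) * 3).toNat = 24 from rfl]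
  simp

-- ===== VERDICT (by name: the statement is the Claim_ definition above) =====
theorem add_checksums_around_payload_spec : Claim_equal_add_checksums_around_payload := by
  intro h p _
  unfold Spec_add_checksums_around_payload add_checksums_around_payload add_checksums_around_payload_alt
  rw [pvCsum_eq, pvCsum_eq]
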